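-- pv_equiv track=rewrite | github.com/scv74502/PS | 프로그래머스/lv2/131704. 택배상자/택배상자.py | solution
-- ===== SOURCE A (Python) =====
-- def solution(order):
--     # 각각 정렬된 짐과 트럭, 보조 컨테이너
--     stock = sorted(order)
--     truck = []
--     temp_con = []
--
--     # 트럭의 인덱스와 요구된 order의 짐 가리키는 인덱스
--     t_idx = 0
--     o_idx  = 0
--
--     for i in range(len(order)):
--         # 현재 stack의 들어온 짐이 order에서 필요한 짐이라면
--         if stock[i] == order[o_idx]:
--             # 트럭에 집어넣고, order의 다음 짐을 가리킴
--             truck.append(order[o_idx])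
--             o_idx += 1
--         # 현재 stack의 들어온 짐이 order에서 필요없는 짐이라면
--         # 먼저 스택(보조 컨테이너)의 맨 위(최신)의 짐이 order가 요구한 짐이라면
--         else:
--             while True:
--                 if temp_con and temp_con[-1] == order[o_idx]:
--                     truck.append(temp_con.pop())
--                     o_idx += 1
--                 else:
--                     break
--             temp_con.append(stock[i])
--     while True:
--         if temp_con and temp_con[-1] == order[o_idx]:
--             truck.append(temp_con.pop())
--             o_idx += 1
--         else:
--             break
--
--
--     return len(truck)
--
--
--
--
--
--
--     answer = 0
--     return answer
-- ===== SOURCE B (Python) =====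
-- def solution(order):
--     # demand-driven: for each wanted box, inspect the belt head; a refused belt
--     # box is 'pending' and is buffered once the buffer stops yielding wanted boxes
--     stock = sorted(order)
--     n = len(stock)
--     i = 0
--     stack = []
--     pending = None
--     ans = 0
--     for box in order:
--         while True:
--             if pending is not None:
--                 if stack and stack[-1] == box:
--                     stack.pop()
--                     ans += 1
--                     break
--                 stack.append(pending)
--                 pending = None
--             elif i < n:
--                 if stock[i] == box:
--                     i += 1
--                     ans += 1
--                     break
--                 pending = stock[i]
--                 i += 1
--             elif stack and stack[-1] == box:
--                 stack.pop()
--                 ans += 1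
--                 break
--             else:
--                 return ans
--     return ans
-- ===== Notes on version B (the rewrite author's own statement) =====
-- stated objective: alternative
-- what changed: Inverted the loop structure: A iterates over the sorted arrivals, draining the side stack on each mismatch plus a final drain; B iterates over the demanded order, serving each wanted box from the belt head, the buffer top, or by buffering a pending refused belt box, and returns early when a box is unreachable.
import Mathlib
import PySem

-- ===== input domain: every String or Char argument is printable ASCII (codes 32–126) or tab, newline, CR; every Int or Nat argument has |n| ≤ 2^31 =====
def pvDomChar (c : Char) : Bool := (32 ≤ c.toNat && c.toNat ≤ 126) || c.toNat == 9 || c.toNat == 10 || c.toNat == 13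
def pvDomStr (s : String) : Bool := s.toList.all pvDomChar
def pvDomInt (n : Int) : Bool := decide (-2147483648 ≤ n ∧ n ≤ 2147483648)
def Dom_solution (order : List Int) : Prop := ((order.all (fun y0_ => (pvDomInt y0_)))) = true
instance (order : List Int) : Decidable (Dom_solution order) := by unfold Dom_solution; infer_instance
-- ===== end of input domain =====

-- B inverts the loop structure: it iterates over the demanded order with a pending belt box,
-- instead of A's iteration over sorted arrivals; equal return value proved for all inputs.

-- ===== PORT A =====
-- A's `while True: if temp_con and temp_con[-1] == order[o_idx]: … else: break` pop loop.
-- The stack temp_con is kept head-=-top; o_idx is represented by the remaining demand list,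
-- and the truck list by its length (A only ever appends and returns len(truck)).
-- When the demand list is empty the loop leaves the state unchanged (Python would only reach
-- order[o_idx] there with a nonempty temp_con, which is unreachable: deliveries never exceed arrivals).
def popLoopA : List Int → List Int → Int → (List Int × List Int × Int)
  | t :: ts, d :: rest, c => if t == d then popLoopA ts rest (c + 1) else (t :: ts, d :: rest, c)
  | tc, ds, c => (tc, ds, c)

-- A's `for i in range(len(order))` over stock, then the final pop loop.
def loopA : List Int → List Int → List Int → Int → Int
  | [], tc, ds, c => (popLoopA tc ds c).2.2
  | x :: xs, tc, ds, c =>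
    match ds with
    | d :: rest =>
      if x == d then loopA xs tc rest (c + 1)
      else
        match popLoopA tc (d :: rest) c with
        | (tc', ds', c') => loopA xs (x :: tc') ds' c'
    | [] => loopA xs (x :: tc) [] c
def solution (order : List Int) : Int :=
  loopA (PySem.List.sorted order (fun v => v) false) [] order 0

-- ===== PORT B =====
-- B's inner `while True` for one wanted box: returns (true, …) on break (box delivered),
-- (false, …) on the early `return ans`.
def binner (box : Int) : List Int → Option Int → List Int → Int →
    Bool × List Int × Option Int × List Int × Int
  | xs, some p, stack, ans =>
    match stack with
    | t :: ts => if t == box then (true, xs, some p, ts, ans + 1) else binner box xs none (p :: t :: ts) ans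
    | [] => binner box xs none [p] ans
  | x :: xs, none, stack, ans =>
    if x == box then (true, xs, none, stack, ans + 1) else binner box xs (some x) stack ans
  | [], none, stack, ans =>
    match stack with
    | t :: ts => if t == box then (true, [], none, ts, ans + 1) else (false, [], none, t :: ts, ans)
    | [] => (false, [], none, [], ans)
  termination_by xs p => (xs.length, match p with | some _ => 1 | none => 0)

-- B's outer `for box in order` loop.
def loopB : List Int → List Int → Option Int → List Int → Int → Int
  | [], _, _, _, ans => ans
  | box :: bs, xs, pending, stack, ans =>
    match binner box xs pending stack ans with
    | (true, xs', p', st', ans') => loopB bs xs' p' st' ans'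
    | (false, _, _, _, ans') => ans'
def solution_alt (order : List Int) : Int :=
  loopB order (PySem.List.sorted order (fun v => v) false) none [] 0

-- ===== PRECONDITION & SPEC =====
def Spec_solution (order : List Int) (out : Int) : Prop := out = solution_alt order
instance (order : List Int) (out : Int) : Decidable (Spec_solution order out) := by unfold Spec_solution; infer_instance

-- ===== CLAIM =====
def Claim_equal_solution : Prop := ∀ (order : List Int), Dom_solution order → Spec_solution order (solution order)

-- ===== LEMMAS AND PROOFS =====
-- With no arrivals left, B's demand loop performs exactly A's final drain.
theorem loopB_drain (tc : List Int) : ∀ (ds : List Int) (c : Int),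
    loopB ds [] none tc c = (popLoopA tc ds c).2.2 := by
  induction tc with
  | nil => intro ds c; cases ds <;> simp [loopB, binner, popLoopA]
  | cons t ts ih =>
    intro ds c
    cases ds with
    | nil => simp [loopB, popLoopA]
    | cons d rest =>
      by_cases h : t = d <;> simp [loopB, binner, popLoopA, h, ih]

-- A pending refused box makes B pop exactly A's pop loop, then push the pending box.
theorem loopB_pending (tc : List Int) : ∀ (ds xs : List Int) (x : Int) (c : Int),
    loopB ds xs (some x) tc c =
      (match popLoopA tc ds c with
       | (tc', ds', c') => loopB ds' xs none (x :: tc') c') := by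
  induction tc with
  | nil =>
    intro ds xs x c
    cases ds with
    | nil => simp [loopB, popLoopA]
    | cons d rest => simp [loopB, binner, popLoopA]
  | cons t ts ih =>
    intro ds xs x c
    cases ds with
    | nil => simp [loopB, popLoopA]
    | cons d rest =>
      by_cases h : t = d
      · simp [loopB, binner, popLoopA, h, ih]
      · simp [loopB, binner, popLoopA, h]

-- unfolding equation for loopB on a nonempty demand list
theorem loopB_cons (box : Int) (bs xs : List Int) (p : Option Int) (st : List Int) (ans : Int) :
    loopB (box :: bs) xs p st ans =
      (match binner box xs p st ans with
       | (true, xs', p', st', ans') => loopB bs xs' p' st' ans'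
       | (false, _, _, _, ans') => ans') := rfl

theorem loopA_eq_loopB (xs : List Int) : ∀ (ds tc : List Int) (c : Int),
    loopA xs tc ds c = loopB ds xs none tc c := by
  induction xs with
  | nil => intro ds tc c; simp [loopA, loopB_drain]
  | cons x xs' ih =>
    intro ds tc c
    cases ds with
    | nil => simp [loopA, loopB, ih]
    | cons d rest =>
      by_cases h : x = d
      · simp [loopA, loopB, binner, h, ih]
      · have hb : (x == d) = false := by simp [h]
        rw [loopA, loopB_cons]
        rw [show binner d (x :: xs') none tc c = binner d xs' (some x) tc c from by
          simp [binner, hb]]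
        simp only [hb, Bool.false_eq_true, if_false]
        rw [← loopB_cons, loopB_pending]
        rcases hp : popLoopA tc (d :: rest) c with ⟨tc', ds', c'⟩
        simp [ih]

-- ===== VERDICT =====
theorem solution_spec : Claim_equal_solution := by
  intro order _
  unfold Spec_solution solution solution_alt
  exact loopA_eq_loopB _ _ _ _
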